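-- pv_equiv track=rewrite | github.com/Ch-Hyuk/Algorithm-Study | 프로그래머스/영어 끝말잇기.py | solution
-- ===== SOURCE A (Python) =====
-- def solution(n, words):
--     word_set = set()
--     last_word = words[0][0]
--     person, cnt = 1, 1
--     for i in range(len(words)):
--         if words[i] in word_set or words[i][0] != last_word:
--             return [person, cnt]
--
--         word_set.add(words[i])
--         last_word = words[i][-1]
--
--         if (i+1)%n == 0:
--             person = 1
--             cnt += 1
--         else:
--             person += 1
--
--     return [0,0]
-- ===== SOURCE B (Python) =====
-- def solution(n, words):
--     # Two independent scans instead of one incrementally-counted loop: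
--     # first duplicate index, first chain-break index, then closed-form divmod.
--     seen = set()
--     dup = 0
--     for w in words:
--         if w in seen:
--             break
--         seen.add(w)
--         dup += 1
--     brk = 1 if words else 0
--     for a, b in zip(words, words[1:]):
--         if b[0] != a[-1]:
--             break
--         brk += 1
--     bad = min(dup, brk)
--     if bad == len(words):
--         return [0, 0]
--     return [bad % n + 1, bad // n + 1]
-- ===== Notes on version B (the rewrite author's own statement) =====
-- stated objective: alternative
-- what changed: Replaces A's single loop with incrementally maintained person/cnt counters, a running set and a carried last_word by two independent scans (first-duplicate index via a set, first chain-break index via adjacent pairs), taking their minimum and deriving the answer in closed form as [bad % n + 1, bad // n + 1].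
-- outside the precondition, e.g. on solution(-2, ['ab', 'ba', 'ab']): A returns [1, 2], B returns [1, 0]; on solution(3, ['aa', 'aa', '']): A returns [2, 1], B raises IndexError
import Mathlib
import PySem

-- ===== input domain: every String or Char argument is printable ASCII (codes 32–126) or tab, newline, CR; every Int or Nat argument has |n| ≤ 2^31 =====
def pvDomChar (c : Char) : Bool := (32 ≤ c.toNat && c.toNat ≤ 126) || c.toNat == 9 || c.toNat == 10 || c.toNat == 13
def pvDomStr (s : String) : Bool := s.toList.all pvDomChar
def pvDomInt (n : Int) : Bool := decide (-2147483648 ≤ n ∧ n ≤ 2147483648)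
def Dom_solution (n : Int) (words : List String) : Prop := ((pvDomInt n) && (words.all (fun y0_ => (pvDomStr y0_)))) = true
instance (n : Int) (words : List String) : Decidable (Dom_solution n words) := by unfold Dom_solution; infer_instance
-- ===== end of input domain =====

-- B replaces A's single loop with incrementally maintained person/cnt counters, a running set and a
-- carried last_word by two independent scans (first-duplicate index, first chain-break index), a min,
-- and a closed-form divmod; equal return values on Pre_ (alternative decomposition, no speed claim).


-- shared tiny accessors: w[0] and w[-1] (Python one-char strings compared as chars; exact on
-- nonempty strings, which Pre_ guarantees — the ' ' default is never reached inside Pre_)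
def pvFirst (w : String) : Char := (PySem.Str.pyGet? w 0).getD ' '
def pvLast (w : String) : Char := (PySem.Str.pyGet? w (-1)).getD ' '

-- ===== PORT A =====
-- the for-loop of A: state = (index i, word_set, last_word, person, cnt)
def solLoopA (n : Int) : List String → Nat → PySem.Set String → Char → Int → Int → List Int
  | [], _, _, _, _, _ => [0, 0]
  | w :: rest, i, ws, last, person, cnt =>
    if w ∈ ws ∨ pvFirst w ≠ last then [person, cnt]
    else if PySem.Int.mod ((i : Int) + 1) n = 0 then
      solLoopA n rest (i + 1) (PySem.Set.add ws w) (pvLast w) 1 (cnt + 1)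
    else
      solLoopA n rest (i + 1) (PySem.Set.add ws w) (pvLast w) (person + 1) cnt

def solution (n : Int) (words : List String) : List Int :=
  -- last_word = words[0][0]
  let last0 := ((PySem.List.pyGet? words 0).bind (fun w => PySem.Str.pyGet? w 0)).getD ' '
  solLoopA n words 0 PySem.Set.empty last0 1 1

-- ===== PORT B =====
-- first duplicate index (length of words if none): the `seen`/`dup` loop of Source B
def dupIdxB (seen : PySem.Set String) : List String → Nat
  | [] => 0
  | w :: rest => if w ∈ seen then 0 else 1 + dupIdxB (PySem.Set.add seen w) rest

-- first chain-break index (length of words if none): the zip(words, words[1:]) loop of Source B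
def brkIdxB : List String → Nat
  | [] => 0
  | [_] => 1
  | a :: b :: rest => if pvFirst b ≠ pvLast a then 1 else 1 + brkIdxB (b :: rest)

def solution_alt (n : Int) (words : List String) : List Int :=
  let dup := dupIdxB PySem.Set.empty words
  let brk := brkIdxB words
  let bad := min dup brk
  if bad = words.length then [0, 0]
  else [PySem.Int.mod (bad : Int) n + 1, PySem.Int.floordiv (bad : Int) n + 1]

-- ===== PRECONDITION & SPEC =====
-- Pre_ excludes: n ≤ 0 (A raises ZeroDivisionError at n = 0; negative n is outside the game's
-- natural domain although A still returns there — cited in claim.json), the empty word list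
-- (IndexError), and lists containing an empty word (A raises IndexError when it reaches one; on a
-- few such lists a violation occurs earlier and A still returns — also cited).
def Pre_solution (n : Int) (words : List String) : Prop :=
  1 ≤ n ∧ words ≠ [] ∧ ∀ w ∈ words, w ≠ ""
instance (n : Int) (words : List String) : Decidable (Pre_solution n words) := by
  unfold Pre_solution; infer_instance

def pvWitness_solution : Int × List String := (3, ["ab", "ba", "ab"])

def Spec_solution (n : Int) (words : List String) (out : List Int) : Prop := out = solution_alt n words
instance (n : Int) (words : List String) (out : List Int) : Decidable (Spec_solution n words out) := by unfold Spec_solution; infer_instance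

-- ===== CLAIM (what is proved, stated in full; the proofs are below) =====
def Claim_equal_solution : Prop := ∀ (n : Int) (words : List String), Dom_solution n words → Pre_solution n words → Spec_solution n words (solution n words)

-- ===== LEMMAS AND PROOFS =====

-- reference: first index at which A's combined violation test fires (length if never)
def badIdx (seen : PySem.Set String) (last : Char) : List String → Nat
  | [] => 0
  | w :: rest => if w ∈ seen ∨ pvFirst w ≠ last then 0 else 1 + badIdx (PySem.Set.add seen w) (pvLast w) rest

-- chain-break scan relative to a previous word
def brkAux (prev : String) : List String → Nat
  | [] => 0
  | b :: rest => if pvFirst b ≠ pvLast prev then 0 else 1 + brkAux b rest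

lemma brkIdxB_cons : ∀ (rest : List String) (prev : String), brkIdxB (prev :: rest) = 1 + brkAux prev rest := by
  intro rest
  induction rest with
  | nil => intro prev; simp [brkIdxB, brkAux]
  | cons b t ih =>
    intro prev
    by_cases hb : pvFirst b ≠ pvLast prev
    · simp [brkIdxB, brkAux, hb]
    · simp [brkIdxB, brkAux, hb, ih b]

lemma badIdx_eq_min : ∀ (rest : List String) (seen : PySem.Set String) (prev : String),
    badIdx seen (pvLast prev) rest = min (dupIdxB seen rest) (brkAux prev rest) := by
  intro rest
  induction rest with
  | nil => intro seen prev; simp [badIdx, dupIdxB, brkAux]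
  | cons w t ih =>
    intro seen prev
    by_cases hmem : w ∈ seen
    · simp [badIdx, dupIdxB, brkAux, hmem]
    · by_cases hb : pvFirst w ≠ pvLast prev
      · simp [badIdx, dupIdxB, brkAux, hmem, hb]
      · simp only [badIdx, dupIdxB, brkAux, if_neg hmem, if_neg hb]
        have h1 : (w ∈ seen ∨ pvFirst w ≠ pvLast prev) = False := by
          simp [hmem, hb]
        simp only [h1, if_false]
        rw [ih (PySem.Set.add seen w) w]
        omega

-- counter step: how i % N and i / N change from i to i+1 (N > 0)
lemma pv_step (N i : Nat) (h0 : 0 < N) :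
    ((i + 1) % N = 0 → (i + 1) / N = i / N + 1) ∧
    ((i + 1) % N ≠ 0 → ((i + 1) % N = i % N + 1 ∧ (i + 1) / N = i / N)) := by
  have hd : (i + 1) / N = i / N + if N ∣ i + 1 then 1 else 0 := Nat.succ_div
  have h1 := Nat.div_add_mod i N
  have h2 := Nat.div_add_mod (i + 1) N
  have hm : i % N < N := Nat.mod_lt _ h0
  by_cases hdvd : N ∣ i + 1
  · have hz : (i + 1) % N = 0 := Nat.dvd_iff_mod_eq_zero.mp hdvd
    constructor
    · intro _; rw [hd, if_pos hdvd]
    · intro h; exact absurd hz h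
  · have hdiv : (i + 1) / N = i / N := by simp [hd, hdvd]
    have hnz : (i + 1) % N ≠ 0 := fun h => hdvd (Nat.dvd_of_mod_eq_zero h)
    constructor
    · intro h; exact absurd h hnz
    · intro _
      refine ⟨?_, hdiv⟩
      rw [hdiv] at h2
      omega

-- A's loop, started at index i with the counters in their closed form, returns the closed form at i + badIdx
lemma solLoopA_spec (N : Nat) (hN : 0 < N) :
    ∀ (rest : List String) (i : Nat) (ws : PySem.Set String) (last : Char),
      solLoopA ((N : Nat) : Int) rest i ws last (((i % N : Nat) : Int) + 1) (((i / N : Nat) : Int) + 1)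
        = if badIdx ws last rest = rest.length then [0, 0]
          else [(((i + badIdx ws last rest) % N : Nat) : Int) + 1,
                (((i + badIdx ws last rest) / N : Nat) : Int) + 1] := by
  intro rest
  induction rest with
  | nil => intro i ws last; simp [solLoopA, badIdx]
  | cons w t ih =>
    intro i ws last
    by_cases hc : w ∈ ws ∨ pvFirst w ≠ last
    · have hb : badIdx ws last (w :: t) = 0 := by simp [badIdx, hc]
      simp [solLoopA, hc, hb]
    · have hmod : PySem.Int.mod ((i : Int) + 1) ((N : Nat) : Int) = (((i + 1) % N : Nat) : Int) := by
        have hcast : ((i : Int) + 1) = (((i + 1 : Nat) : Nat) : Int) := by push_cast; ring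
        rw [hcast, PySem.Int.mod_natCast]
      have hb : badIdx ws last (w :: t) = 1 + badIdx (PySem.Set.add ws w) (pvLast w) t := by
        simp [badIdx, hc]
      have hstep := pv_step N i hN
      have hL : solLoopA ((N : Nat) : Int) (w :: t) i ws last (((i % N : Nat) : Int) + 1) (((i / N : Nat) : Int) + 1)
          = solLoopA ((N : Nat) : Int) t (i + 1) (PySem.Set.add ws w) (pvLast w)
              ((((i + 1) % N : Nat) : Int) + 1) ((((i + 1) / N : Nat) : Int) + 1) := by
        by_cases hz : (i + 1) % N = 0
        · have hdiv : (i + 1) / N = i / N + 1 := hstep.1 hz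
          simp only [solLoopA, if_neg hc, hmod]
          rw [if_pos (by exact_mod_cast hz : (((i + 1) % N : Nat) : Int) = 0), hz, hdiv]
          push_cast
          ring_nf
        · obtain ⟨hm', hd'⟩ := hstep.2 hz
          have hznat : ¬ ((((i + 1) % N : Nat) : Int) = 0) := by exact_mod_cast hz
          simp only [solLoopA, if_neg hc, hmod]
          rw [if_neg hznat, hm', hd']
          push_cast
          ring_nf
      rw [hL, ih (i + 1) (PySem.Set.add ws w) (pvLast w), hb]
      have hcond : (1 + badIdx (PySem.Set.add ws w) (pvLast w) t = (w :: t).length)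
          = (badIdx (PySem.Set.add ws w) (pvLast w) t = t.length) := by
        simp only [List.length_cons]
        exact propext (by omega)
      have h2 : i + (1 + badIdx (PySem.Set.add ws w) (pvLast w) t)
          = (i + 1) + badIdx (PySem.Set.add ws w) (pvLast w) t := by omega
      simp only [hcond, h2]

-- ===== VERDICT (by name: the statement is the Claim_ definition above) =====
theorem solution_spec : Claim_equal_solution := by
  intro n words _ hpre
  obtain ⟨hn, hne, -⟩ := hpre
  unfold Spec_solution
  obtain ⟨w0, t, rfl⟩ : ∃ w0 t, words = w0 :: t := by
    cases words with
    | nil => exact absurd rfl hne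
    | cons a b => exact ⟨a, b, rfl⟩
  set N := n.toNat with hNdef
  have hNn : ((N : Nat) : Int) = n := Int.toNat_of_nonneg (by omega)
  have hN0 : 0 < N := by omega
  -- top-level step of the reference index
  have htop : badIdx PySem.Set.empty (pvFirst w0) (w0 :: t)
      = 1 + badIdx (PySem.Set.add PySem.Set.empty w0) (pvLast w0) t := by
    simp [badIdx, PySem.Set.empty]
  have hdup : dupIdxB PySem.Set.empty (w0 :: t) = 1 + dupIdxB (PySem.Set.add PySem.Set.empty w0) t := by
    simp [dupIdxB, PySem.Set.empty]
  have hbad : min (dupIdxB PySem.Set.empty (w0 :: t)) (brkIdxB (w0 :: t))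
      = badIdx PySem.Set.empty (pvFirst w0) (w0 :: t) := by
    rw [htop, hdup, brkIdxB_cons t w0, badIdx_eq_min t (PySem.Set.add PySem.Set.empty w0) w0]
    omega
  -- evaluate A
  have hlast0 : ((PySem.List.pyGet? (w0 :: t) 0).bind (fun w => PySem.Str.pyGet? w 0)).getD ' ' = pvFirst w0 := by
    simp [PySem.List.pyGet?, PySem.List.pyIdx?, pvFirst]
  have hA : solution n (w0 :: t)
      = solLoopA ((N : Nat) : Int) (w0 :: t) 0 PySem.Set.empty (pvFirst w0) (((0 % N : Nat) : Int) + 1) (((0 / N : Nat) : Int) + 1) := by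
    unfold solution
    rw [hlast0, hNn]
    norm_num
  rw [hA, solLoopA_spec N hN0 (w0 :: t) 0 PySem.Set.empty (pvFirst w0)]
  -- evaluate B
  unfold solution_alt
  dsimp only
  rw [hbad, ← hNn, PySem.Int.mod_natCast, PySem.Int.floordiv_natCast]
  have h2 : 0 + badIdx PySem.Set.empty (pvFirst w0) (w0 :: t)
      = badIdx PySem.Set.empty (pvFirst w0) (w0 :: t) := by omega
  rw [h2]
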